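-- pv_equiv track=rewrite | github.com/katealtonwilliams/spooky-challenge | example_solution.py | decode_all_coords
-- ===== SOURCE A (Python) =====
-- spooky_map = {
--     "eerie": "0",
--     "witch": "1",
--     "ghoul": "2",
--     "goblin": "3",
--     "howl": "4",
--     "lurking": "5",
--     "cackle": "6",
--     "vile": "7",
--     "vampire": "8",
--     "petrify": "9",
-- }
--
-- def find_digit(word_or_digit: str) -> str:
--     if word_or_digit.isdigit():
--         return word_or_digit
--     return spooky_map[word_or_digit]
--
-- def decode_single_coord(line: str) -> int:
--     last_digit_index = 100
--     first_digit_index = 100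
--
--     for word_or_digit in list(spooky_map.keys()) + list(spooky_map.values()):
--         word_distance_from_start = line.find(word_or_digit)
--         word_distance_from_end = line[::-1].find(word_or_digit[::-1])
--
--         if (
--             word_distance_from_start > -1
--             and word_distance_from_start < first_digit_index
--         ):
--             first_digit_index = word_distance_from_start
--             first_word_or_digit = word_or_digit
--
--         if word_distance_from_end > -1 and word_distance_from_end < last_digit_index:
--             last_digit_index = word_distance_from_end
--             last_word_or_digit = word_or_digit
--
--     full_number = find_digit(first_word_or_digit) + find_digit(last_word_or_digit)
--
--     return int(full_number)
--
-- def decode_all_coords(all_lines: list[str]) -> list[tuple[int]]: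
--     encoded_coords = [
--         (all_lines[i], all_lines[i + 1]) for i in range(0, len(all_lines), 2)
--     ]
--     decoded_coords = []
--     for encoded_row, encoded_column in encoded_coords:
--         decoded_coords.append(
--             (decode_single_coord(encoded_row), decode_single_coord(encoded_column))
--         )
--     return decoded_coords
-- ===== SOURCE B (Python) =====
-- spooky_map = {
--     "eerie": "0",
--     "witch": "1",
--     "ghoul": "2",
--     "goblin": "3",
--     "howl": "4",
--     "lurking": "5",
--     "cackle": "6",
--     "vile": "7",
--     "vampire": "8",
--     "petrify": "9",
-- }
--
-- TOKENS = list(spooky_map.keys()) + list(spooky_map.values())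
-- DIGIT = {**spooky_map, **{d: d for d in spooky_map.values()}}
--
--
-- def _decode_line(line: str) -> int:
--     # One left-to-right scan over character positions.  At each position at
--     # most one token can match (no token is a prefix of another), so the first
--     # match found is the earliest token and max end selects the latest token.
--     first = None
--     last = None
--     best_end = -1
--     for i in range(len(line)):
--         for t in TOKENS:
--             if line.startswith(t, i):
--                 if first is None:
--                     first = t
--                 end = i + len(t)
--                 if end > best_end:
--                     best_end = end
--                     last = t
--                 break
--     if first is None:
--         raise ValueError("no spooky token in line")
--     return int(DIGIT[first] + DIGIT[last])
--
--
-- def decode_all_coords(all_lines: list[str]) -> list[tuple[int]]: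
--     it = iter(all_lines)
--     return [(_decode_line(row), _decode_line(col)) for row, col in zip(it, it)]
-- ===== Notes on version B (the rewrite author's own statement) =====
-- stated objective: alternative
-- what changed: decode_single_coord's 20 per-token line.find / reversed-line.find passes are replaced by a single left-to-right scan over character positions that keeps the earliest matching token and the token with the maximal match end, and the even/odd index pairing is replaced by zip(it, it) over one iterator.
import Mathlib
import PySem

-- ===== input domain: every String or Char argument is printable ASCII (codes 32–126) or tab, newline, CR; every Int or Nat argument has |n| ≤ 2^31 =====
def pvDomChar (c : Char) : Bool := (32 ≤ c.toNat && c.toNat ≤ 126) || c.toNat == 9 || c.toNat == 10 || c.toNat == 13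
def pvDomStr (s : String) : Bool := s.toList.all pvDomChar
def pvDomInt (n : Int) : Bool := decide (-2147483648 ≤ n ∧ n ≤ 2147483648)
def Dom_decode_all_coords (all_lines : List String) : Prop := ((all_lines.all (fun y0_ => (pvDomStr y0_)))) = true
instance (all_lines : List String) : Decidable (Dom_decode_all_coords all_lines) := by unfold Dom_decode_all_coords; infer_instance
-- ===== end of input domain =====

-- B replaces A's 20 per-token find / reversed-find passes by ONE left-to-right scan over
-- character positions (earliest match kept as first token, maximal match end as last token)
-- and pairs the lines by two-at-a-time recursion instead of index arithmetic (objective: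
-- alternative decomposition, similar cost).

-- ===== PORT A =====

-- spooky_map (dict literal, insertion order)
def pvSpookyDict : PySem.Dict (List Char) (List Char) := PySem.Dict.ofList
  [("eerie".toList, "0".toList), ("witch".toList, "1".toList), ("ghoul".toList, "2".toList),
   ("goblin".toList, "3".toList), ("howl".toList, "4".toList), ("lurking".toList, "5".toList),
   ("cackle".toList, "6".toList), ("vile".toList, "7".toList), ("vampire".toList, "8".toList),
   ("petrify".toList, "9".toList)]

-- find_digit; none = KeyError (unreachable for the tokens A feeds it)
def pvFindDigitA (w : List Char) : Option (List Char) :=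
  if PySem.Chars.strIsdigit w then some w else pvSpookyDict.get? w

-- the loop body's two 'if' updates share this shape (g = the find distance of the token)
def pvAStep (g : List Char → Int) (st : Int × Option (List Char)) (t : List Char) :
    Int × Option (List Char) :=
  if g t > -1 ∧ g t < st.1 then (g t, some t) else st

-- decode_single_coord; none = UnboundLocalError (no first/last token found).
-- line.find(w) is PySem.Chars.find; line[::-1] is reversal (PySem.List.slice?_none_none_neg_one),
-- so line[::-1].find(w[::-1]) is ported as find on the reversed char lists (exact).
def pvDecodeSingleA (line : String) : Option Int :=
  match (pvSpookyDict.keys ++ pvSpookyDict.values).foldl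
      (fun st t =>
        (pvAStep (fun u => PySem.Chars.find line.toList u) st.1 t,
         pvAStep (fun u => PySem.Chars.find line.toList.reverse u.reverse) st.2 t))
      ((100, none), (100, none)) with
  | ((_, some f), (_, some l)) =>
    (match pvFindDigitA f, pvFindDigitA l with
     | some df, some dl => PySem.Int.ofChars? (df ++ dl)    -- int(full_number), always digits here
     | _, _ => none)
  | _ => none

-- decode_all_coords: the pairing comprehension over range(0, len, 2), then the append loop.
-- all_lines[i] is pyGet?; the .getD "" / .getD 0 defaults are reached only where the Python
-- raises (IndexError on odd length / UnboundLocalError in decode_single_coord), i.e. outside Pre_.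
def decode_all_coords (all_lines : List String) : List (Int × Int) :=
  let encoded := (PySem.List.pyRange 0 (all_lines.length : Int) 2).map
    (fun i => ((PySem.List.pyGet? all_lines i).getD "", (PySem.List.pyGet? all_lines (i + 1)).getD ""))
  encoded.foldl
    (fun acc p => acc ++ [((pvDecodeSingleA p.1).getD 0, (pvDecodeSingleA p.2).getD 0)]) []

-- ===== PORT B =====

-- TOKENS = list(spooky_map) + list(spooky_map.values())
def pvTokens : List (List Char) :=
  ["eerie".toList, "witch".toList, "ghoul".toList, "goblin".toList, "howl".toList,
   "lurking".toList, "cackle".toList, "vile".toList, "vampire".toList, "petrify".toList,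
   "0".toList, "1".toList, "2".toList, "3".toList, "4".toList,
   "5".toList, "6".toList, "7".toList, "8".toList, "9".toList]

-- DIGIT = {**spooky_map, **{d: d for d in spooky_map.values()}}
def pvDigitDict : PySem.Dict (List Char) (List Char) := PySem.Dict.ofList
  [("eerie".toList, "0".toList), ("witch".toList, "1".toList), ("ghoul".toList, "2".toList),
   ("goblin".toList, "3".toList), ("howl".toList, "4".toList), ("lurking".toList, "5".toList),
   ("cackle".toList, "6".toList), ("vile".toList, "7".toList), ("vampire".toList, "8".toList),
   ("petrify".toList, "9".toList),
   ("0".toList, "0".toList), ("1".toList, "1".toList), ("2".toList, "2".toList),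
   ("3".toList, "3".toList), ("4".toList, "4".toList), ("5".toList, "5".toList),
   ("6".toList, "6".toList), ("7".toList, "7".toList), ("8".toList, "8".toList),
   ("9".toList, "9".toList)]

-- the scan loop of _decode_line: range(len(line)) is List.range; line.startswith(t, i) for
-- 0 ≤ i < len(line) is the prefix test on the drop (exact); the inner for/break is find?.
def pvBStep (c : List Char) (st : Option (List Char) × (Option (List Char) × Int)) (i : Nat) :
    Option (List Char) × (Option (List Char) × Int) :=
  match pvTokens.find? (fun t => PySem.Chars.startswith (c.drop i) t) with
  | none => st
  | some t =>
    let first := match st.1 with | none => some t | some f => some f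
    let e : Int := (i : Int) + (t.length : Int)
    if e > st.2.2 then (first, (some t, e)) else (first, st.2)

def pvScanB (c : List Char) : Option (List Char) × (Option (List Char) × Int) :=
  (List.range c.length).foldl (pvBStep c) (none, (none, -1))

-- _decode_line; none = ValueError (no token in the line)
def pvDecodeSingleB (line : String) : Option Int :=
  match pvScanB line.toList with
  | (some f, (some l, _)) =>
    (match pvDigitDict.get? f, pvDigitDict.get? l with
     | some df, some dl => PySem.Int.ofChars? (df ++ dl)
     | _, _ => none)
  | _ => none

-- zip(it, it): consecutive pairs, a trailing odd element is dropped
def pvPairUp : List String → List (String × String)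
  | a :: b :: rest => (a, b) :: pvPairUp rest
  | _ => []

-- the .getD 0 default is reached only where the Python B raises ValueError, i.e. outside Pre_
def decode_all_coords_alt (all_lines : List String) : List (Int × Int) :=
  (pvPairUp all_lines).map
    (fun p => ((pvDecodeSingleB p.1).getD 0, (pvDecodeSingleB p.2).getD 0))

-- ===== PRECONDITION & SPEC =====

-- A returns on a line iff some token occurrence starts before index 100 AND some token
-- occurrence ends less than 100 characters from the end of the line (A's initial indices
-- of 100 ignore occurrences beyond those thresholds; with none in reach, A raises
-- UnboundLocalError).
def pvLineOK (c : List Char) : Prop :=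
  (∃ i < 100, ∃ t ∈ pvTokens, t <+: c.drop i) ∧
  (∃ i < c.length, ∃ t ∈ pvTokens, t <+: c.drop i ∧ c.length < i + t.length + 100)

-- executable form of pvLineOK (kept so that deciding Pre_ stays shallow for the kernel)
def pvLineOKb (c : List Char) : Bool :=
  ((List.range 100).any fun i => pvTokens.any fun t => t.isPrefixOf (c.drop i)) &&
  ((List.range c.length).any fun i =>
    pvTokens.any fun t => t.isPrefixOf (c.drop i) && decide (c.length < i + t.length + 100))

lemma pvLineOK_iff (c : List Char) : pvLineOK c ↔ pvLineOKb c = true := by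
  unfold pvLineOK pvLineOKb
  simp [List.mem_range, List.isPrefixOf_iff_prefix]

-- Pre_ excludes exactly the inputs on which A raises: odd-length lists (IndexError in the
-- pairing comprehension) and lines with no token occurrence starting before index 100 or
-- none ending within 100 characters of the line end (UnboundLocalError).
def Pre_decode_all_coords (all_lines : List String) : Prop :=
  all_lines.length % 2 = 0 ∧ ∀ s ∈ all_lines, pvLineOK s.toList

instance (all_lines : List String) : Decidable (Pre_decode_all_coords all_lines) := by
  unfold Pre_decode_all_coords
  letI : ∀ c, Decidable (pvLineOK c) := fun c => decidable_of_iff _ (pvLineOK_iff c).symm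
  infer_instance

def pvWitness_decode_all_coords : List String := ["witch", "eerie3"]

def Spec_decode_all_coords (all_lines : List String) (out : List (Int × Int)) : Prop :=
  out = decode_all_coords_alt all_lines
instance (all_lines : List String) (out : List (Int × Int)) : Decidable (Spec_decode_all_coords all_lines out) := by
  unfold Spec_decode_all_coords; infer_instance

-- ===== CLAIM (what is proved, stated in full; the proofs are below) =====
def Claim_equal_decode_all_coords : Prop := ∀ (all_lines : List String), Dom_decode_all_coords all_lines → Pre_decode_all_coords all_lines → Spec_decode_all_coords all_lines (decode_all_coords all_lines)

-- ===== LEMMAS AND PROOFS =====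

-- a token matches the line at position i
def pvMatchAt (c : List Char) (i : Nat) (t : List Char) : Prop := t ∈ pvTokens ∧ t <+: c.drop i

-- the inner for/break of B's scan
def pvHit (c : List Char) (i : Nat) : Option (List Char) :=
  pvTokens.find? (fun t => PySem.Chars.startswith (c.drop i) t)

lemma pvToks_ne_nil : ∀ t ∈ pvTokens, t ≠ [] := by decide

lemma pvToks_no_prefix : ∀ t₁ ∈ pvTokens, ∀ t₂ ∈ pvTokens, t₁.isPrefixOf t₂ → t₁ = t₂ := by decide

lemma pvToks_no_suffix : ∀ t₁ ∈ pvTokens, ∀ t₂ ∈ pvTokens, t₁.isSuffixOf t₂ → t₁ = t₂ := by decide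

lemma pvKeysValues : pvSpookyDict.keys ++ pvSpookyDict.values = pvTokens := by decide

lemma pvDigit_eq : ∀ t ∈ pvTokens, pvFindDigitA t = pvDigitDict.get? t := by decide

lemma pvMatchAt_le (c : List Char) (i : Nat) (t : List Char) (h : pvMatchAt c i t) :
    i < c.length ∧ i + t.length ≤ c.length := by
  obtain ⟨hm, hp⟩ := h
  have hne := pvToks_ne_nil t hm
  have hlen : t.length ≤ c.length - i := by
    simpa [List.length_drop] using hp.length_le
  have ht1 : 1 ≤ t.length := List.length_pos_iff.mpr hne
  constructor <;> omega

lemma pvUniqAt (c : List Char) (i : Nat) (t₁ t₂ : List Char)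
    (h₁ : pvMatchAt c i t₁) (h₂ : pvMatchAt c i t₂) : t₁ = t₂ := by
  rcases List.prefix_or_prefix_of_prefix h₁.2 h₂.2 with h | h
  · exact pvToks_no_prefix t₁ h₁.1 t₂ h₂.1 (List.isPrefixOf_iff_prefix.mpr h)
  · exact (pvToks_no_prefix t₂ h₂.1 t₁ h₁.1 (List.isPrefixOf_iff_prefix.mpr h)).symm

-- t occurs as a suffix of c.take m  ↔  it occurs ending exactly at m
lemma pvSuffixTake (c t : List Char) (m : Nat) (hm : m ≤ c.length) :
    t <:+ c.take m ↔ ∃ i, i + t.length = m ∧ t <+: c.drop i := by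
  constructor
  · rintro ⟨p, hp⟩
    have hlen : p.length + t.length = m := by
      have := congrArg List.length hp
      simp [List.length_take] at this
      omega
    refine ⟨p.length, hlen, ?_⟩
    have : List.drop p.length (c.take m) = t := by
      rw [← hp]; simp
    rw [List.drop_take] at this
    exact this ▸ List.take_prefix _ _
  · rintro ⟨i, hi, hp⟩
    obtain ⟨r, hr⟩ := hp
    have hle : i ≤ m := by omega
    have : c.take m = c.take i ++ t := by
      have h1 : m = i + t.length := by omega
      rw [h1, List.take_add, ← hr]
      simp
    rw [this]
    exact List.suffix_append _ _

lemma pvUniqEnd (c : List Char) (i₁ i₂ : Nat) (t₁ t₂ : List Char)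
    (h₁ : pvMatchAt c i₁ t₁) (h₂ : pvMatchAt c i₂ t₂)
    (he : i₁ + t₁.length = i₂ + t₂.length) : t₁ = t₂ := by
  have hm₁ := pvMatchAt_le c i₁ t₁ h₁
  have hm₂ := pvMatchAt_le c i₂ t₂ h₂
  set m := i₁ + t₁.length with hm
  have hs₁ : t₁ <:+ c.take m :=
    (pvSuffixTake c t₁ m (by omega)).mpr ⟨i₁, rfl, h₁.2⟩
  have hs₂ : t₂ <:+ c.take m :=
    (pvSuffixTake c t₂ m (by omega)).mpr ⟨i₂, he.symm, h₂.2⟩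
  rcases List.suffix_or_suffix_of_suffix hs₁ hs₂ with h | h
  · exact pvToks_no_suffix t₁ h₁.1 t₂ h₂.1 (List.isSuffixOf_iff_suffix.mpr h)
  · exact (pvToks_no_suffix t₂ h₂.1 t₁ h₁.1 (List.isSuffixOf_iff_suffix.mpr h)).symm

-- the reversed-find bridge: an occurrence of t.reverse at distance d in c.reverse is an
-- occurrence of t in c ending at c.length - d
lemma pvRevPrefix (c t : List Char) (d : Nat) (hd : d ≤ c.length) :
    t.reverse <+: c.reverse.drop d ↔ ∃ i, i + t.length + d = c.length ∧ t <+: c.drop i := by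
  have hdrop : c.reverse.drop d = (c.take (c.length - d)).reverse := by
    have := @List.reverse_drop Char c.reverse d
    rw [List.reverse_reverse] at this
    have h2 := congrArg List.reverse this
    rw [List.reverse_reverse] at h2
    rw [h2, List.length_reverse]
  rw [hdrop, List.reverse_prefix]
  rw [pvSuffixTake c t (c.length - d) (by omega)]
  constructor
  · rintro ⟨i, hi, hp⟩; exact ⟨i, by omega, hp⟩
  · rintro ⟨i, hi, hp⟩; exact ⟨i, by omega, hp⟩

-- characterisation of A's min-fold
lemma pvAFold (g : List Char → Int) (ts : List (List Char)) (b : Int) (w : Option (List Char)) :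
    (ts.foldl (pvAStep g) (b, w) = (b, w) ∧ ∀ t ∈ ts, ¬(g t > -1 ∧ g t < b)) ∨
    (∃ t ∈ ts, ts.foldl (pvAStep g) (b, w) = (g t, some t) ∧ g t > -1 ∧ g t < b ∧
      ∀ u ∈ ts, g u > -1 → g t ≤ g u) := by
  induction ts generalizing b w with
  | nil => exact Or.inl ⟨rfl, by simp⟩
  | cons t ts ih =>
    simp only [List.foldl_cons]
    by_cases hc : g t > -1 ∧ g t < b
    · have hstep : pvAStep g (b, w) t = (g t, some t) := by
        simp [pvAStep, hc]
      rw [hstep]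
      rcases ih (g t) (some t) with ⟨heq, hall⟩ | ⟨u, hu, heq, h1, h2, hmin⟩
      · refine Or.inr ⟨t, List.mem_cons_self, heq, hc.1, hc.2, ?_⟩
        intro v hv hvpos
        rcases List.mem_cons.mp hv with rfl | hv
        · exact le_refl _
        · have h3 := hall v hv
          push Not at h3
          exact h3 hvpos
      · refine Or.inr ⟨u, List.mem_cons_of_mem _ hu, heq, h1, by omega, ?_⟩
        intro v hv hvpos
        rcases List.mem_cons.mp hv with rfl | hv
        · omega
        · exact hmin v hv hvpos
    · have hstep : pvAStep g (b, w) t = (b, w) := by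
        simp only [pvAStep, if_neg hc]
      rw [hstep]
      rcases ih b w with ⟨heq, hall⟩ | ⟨u, hu, heq, h1, h2, hmin⟩
      · refine Or.inl ⟨heq, ?_⟩
        intro v hv
        rcases List.mem_cons.mp hv with rfl | hv
        · exact hc
        · exact hall v hv
      · refine Or.inr ⟨u, List.mem_cons_of_mem _ hu, heq, h1, h2, ?_⟩
        intro v hv hvpos
        rcases List.mem_cons.mp hv with rfl | hv
        · omega
        · exact hmin v hv hvpos

lemma pvHit_some (c : List Char) (i : Nat) (t : List Char) (h : pvHit c i = some t) :
    pvMatchAt c i t := by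
  have hmem := List.mem_of_find?_eq_some h
  have hsw := List.find?_some h
  exact ⟨hmem, (PySem.Chars.startswith_iff _ _).mp hsw⟩

lemma pvHit_of_match (c : List Char) (i : Nat) (t : List Char) (h : pvMatchAt c i t) :
    ∃ u, pvHit c i = some u := by
  have : (pvTokens.find? (fun t => PySem.Chars.startswith (c.drop i) t)).isSome = true := by
    rw [List.find?_isSome]
    exact ⟨t, h.1, (PySem.Chars.startswith_iff _ _).mpr h.2⟩
  obtain ⟨u, hu⟩ := Option.isSome_iff_exists.mp this
  exact ⟨u, hu⟩

lemma pvBStep_none (c : List Char) (i : Nat)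
    (st : Option (List Char) × (Option (List Char) × Int))
    (h : pvHit c i = none) : pvBStep c st i = st := by
  unfold pvHit at h
  simp [pvBStep, h]

lemma pvBStep_some (c : List Char) (i : Nat)
    (st : Option (List Char) × (Option (List Char) × Int)) (t : List Char)
    (h : pvHit c i = some t) :
    pvBStep c st i =
      ((match st.1 with | none => some t | some f => some f),
       if (i : Int) + (t.length : Int) > st.2.2
       then (some t, (i : Int) + (t.length : Int)) else st.2) := by
  unfold pvHit at h
  simp only [pvBStep, h]
  split_ifs <;> rfl

-- characterisation of B's scan over the first n positions
lemma pvBScan (c : List Char) (n : Nat) :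
    ((List.range n).foldl (pvBStep c) (none, (none, -1)) = (none, (none, -1)) ∧
      ∀ i < n, pvHit c i = none) ∨
    (∃ i₀ < n, ∃ t₀, pvHit c i₀ = some t₀ ∧ (∀ j < i₀, pvHit c j = none) ∧
     ∃ i₁ < n, ∃ t₁, pvHit c i₁ = some t₁ ∧
      (List.range n).foldl (pvBStep c) (none, (none, -1))
        = (some t₀, (some t₁, (i₁ : Int) + (t₁.length : Int))) ∧
      ∀ j < n, ∀ u, pvHit c j = some u →
        (j : Int) + (u.length : Int) ≤ (i₁ : Int) + (t₁.length : Int)) := by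
  induction n with
  | zero => exact Or.inl ⟨rfl, fun i hi => absurd hi (Nat.not_lt_zero i)⟩
  | succ n ih =>
    rw [List.range_succ, List.foldl_append, List.foldl_cons, List.foldl_nil]
    rcases hn : pvHit c n with _ | t
    · rcases ih with ⟨heq, hnone⟩ | ⟨i₀, hi₀, t₀, ht₀, hfirst, i₁, hi₁, t₁, ht₁, heq, hmax⟩
      · rw [heq, pvBStep_none c n _ hn]
        refine Or.inl ⟨rfl, fun i hi => ?_⟩
        rcases Nat.lt_succ_iff_lt_or_eq.mp hi with hi | rfl
        · exact hnone i hi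
        · exact hn
      · rw [heq, pvBStep_none c n _ hn]
        refine Or.inr ⟨i₀, Nat.lt_succ_of_lt hi₀, t₀, ht₀, hfirst,
          i₁, Nat.lt_succ_of_lt hi₁, t₁, ht₁, rfl, fun j hj u hu => ?_⟩
        rcases Nat.lt_succ_iff_lt_or_eq.mp hj with hj | rfl
        · exact hmax j hj u hu
        · rw [hn] at hu; exact absurd hu (by simp)
    · rcases ih with ⟨heq, hnone⟩ | ⟨i₀, hi₀, t₀, ht₀, hfirst, i₁, hi₁, t₁, ht₁, heq, hmax⟩
      · rw [heq, pvBStep_some c n _ t hn]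
        have hpos : ((n : Int) + (t.length : Int)) > -1 := by omega
        refine Or.inr ⟨n, Nat.lt_succ_self n, t, hn, fun j hj => hnone j hj,
          n, Nat.lt_succ_self n, t, hn, ?_, fun j hj u hu => ?_⟩
        · simp [hpos]
        · rcases Nat.lt_succ_iff_lt_or_eq.mp hj with hj | rfl
          · rw [hnone j hj] at hu; exact absurd hu (by simp)
          · rw [hn] at hu
            obtain rfl : t = u := by injection hu
            exact le_refl _
      · rw [heq, pvBStep_some c n _ t hn]
        by_cases hgt : ((n : Int) + (t.length : Int)) > (i₁ : Int) + (t₁.length : Int)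
        · refine Or.inr ⟨i₀, Nat.lt_succ_of_lt hi₀, t₀, ht₀, hfirst,
            n, Nat.lt_succ_self n, t, hn, ?_, fun j hj u hu => ?_⟩
          · simp [hgt]
          · rcases Nat.lt_succ_iff_lt_or_eq.mp hj with hj | rfl
            · exact le_of_lt (lt_of_le_of_lt (hmax j hj u hu) hgt)
            · rw [hn] at hu
              obtain rfl : t = u := by injection hu
              exact le_refl _
        · refine Or.inr ⟨i₀, Nat.lt_succ_of_lt hi₀, t₀, ht₀, hfirst,
            i₁, Nat.lt_succ_of_lt hi₁, t₁, ht₁, ?_, fun j hj u hu => ?_⟩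
          · simp [hgt]
          · rcases Nat.lt_succ_iff_lt_or_eq.mp hj with hj | rfl
            · exact hmax j hj u hu
            · rw [hn] at hu
              obtain rfl : t = u := by injection hu
              exact le_of_not_gt hgt

-- find points at the first occurrence, so any occurrence bounds it from above
lemma pvFind_le (c t : List Char) (i : Nat) (hp : t <+: c.drop i) :
    0 ≤ PySem.Chars.find c t ∧ PySem.Chars.find c t ≤ (i : Int) := by
  have hinf : t <:+: c := by
    obtain ⟨r, hr⟩ := hp
    exact ⟨c.take i, r, by rw [List.append_assoc, hr, List.take_append_drop]⟩
  have h0 : 0 ≤ PySem.Chars.find c t := (PySem.Chars.find_nonneg_iff c t).mpr hinf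
  refine ⟨h0, ?_⟩
  by_contra hgt
  have hlt : i < (PySem.Chars.find c t).toNat := by omega
  exact (PySem.Chars.find_spec h0).2 i hlt hp

-- the per-line equality
lemma pvSingleEq (s : String) (h : pvLineOK s.toList) :
    pvDecodeSingleA s = pvDecodeSingleB s := by
  obtain ⟨⟨iF, hiF, tF, htF, hpF⟩, ⟨iE, hiE, tE, htE, hpE, hiE2⟩⟩ := h
  have hFle := pvFind_le s.toList tF iF hpF
  have hmFle := pvMatchAt_le s.toList iF tF ⟨htF, hpF⟩
  have hmEle := pvMatchAt_le s.toList iE tE ⟨htE, hpE⟩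
  -- the reversed occurrence of tE bounds the reversed find
  have hErev : tE.reverse <+: s.toList.reverse.drop (s.toList.length - (iE + tE.length)) := by
    refine (pvRevPrefix s.toList tE (s.toList.length - (iE + tE.length)) (by omega)).mpr ?_
    exact ⟨iE, by omega, hpE⟩
  have hEle := pvFind_le s.toList.reverse tE.reverse (s.toList.length - (iE + tE.length)) hErev
  -- A's two folds
  rcases pvAFold (fun u => PySem.Chars.find s.toList u) pvTokens 100 none with
    ⟨_, hallA⟩ | ⟨tA, memA, heqA, hposA, hltA, hminA⟩
  · exact absurd ⟨by show PySem.Chars.find s.toList tF > -1; omega,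
      by show PySem.Chars.find s.toList tF < 100; omega⟩ (hallA tF htF)
  rcases pvAFold (fun u => PySem.Chars.find s.toList.reverse u.reverse) pvTokens 100 none with
    ⟨_, hallL⟩ | ⟨tL, memL, heqL, hposL, hltL, hminL⟩
  · exact absurd ⟨by show PySem.Chars.find s.toList.reverse tE.reverse > -1; omega,
      by show PySem.Chars.find s.toList.reverse tE.reverse < 100; omega⟩ (hallL tE htE)
  -- B's scan
  rcases pvBScan s.toList s.toList.length with
    ⟨_, hnone⟩ | ⟨i₀, hi₀, t₀, ht₀, hfirst, i₁, hi₁, t₁, ht₁, heqB, hmax⟩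
  · obtain ⟨u, hu⟩ := pvHit_of_match s.toList iF tF ⟨htF, hpF⟩
    rw [hnone iF hmFle.1] at hu
    exact absurd hu (by simp)
  -- A's first token occurs at its find position
  have hA0 : 0 ≤ PySem.Chars.find s.toList tA := by omega
  have hApref : tA <+: s.toList.drop (PySem.Chars.find s.toList tA).toNat :=
    (PySem.Chars.find_spec hA0).1
  have hm₀ := pvHit_some s.toList i₀ t₀ ht₀
  -- i₀ = find position of tA
  have h₀A : (PySem.Chars.find s.toList tA).toNat = i₀ := by
    have h1 : ¬ i₀ > (PySem.Chars.find s.toList tA).toNat := by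
      intro hgt
      obtain ⟨u, hu⟩ := pvHit_of_match s.toList _ tA ⟨memA, hApref⟩
      rw [hfirst _ hgt] at hu
      exact absurd hu (by simp)
    have h2 := pvFind_le s.toList t₀ i₀ hm₀.2
    have h3 := hminA t₀ hm₀.1 (by omega)
    omega
  have e₀ : t₀ = tA := pvUniqAt s.toList i₀ t₀ tA hm₀ ⟨memA, h₀A ▸ hApref⟩
  -- A's last token: decode the reversed find
  have hL0 : 0 ≤ PySem.Chars.find s.toList.reverse tL.reverse := by omega
  have hLlen : (PySem.Chars.find s.toList.reverse tL.reverse).toNat ≤ s.toList.length := by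
    have := PySem.Chars.find_le_length s.toList.reverse tL.reverse
    simp only [List.length_reverse] at this
    omega
  obtain ⟨iL, hiLend, hpL⟩ :=
    (pvRevPrefix s.toList tL (PySem.Chars.find s.toList.reverse tL.reverse).toNat hLlen).mp
      (PySem.Chars.find_spec hL0).1
  have hm₁ := pvHit_some s.toList i₁ t₁ ht₁
  have hmL := pvMatchAt_le s.toList iL tL ⟨memL, hpL⟩
  have hm₁le := pvMatchAt_le s.toList i₁ t₁ hm₁
  -- ends agree
  have hend : i₁ + t₁.length = iL + tL.length := by
    -- (i) iL + |tL| ≤ i₁ + |t₁| via B's maximality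
    have hmaxL : (iL : Int) + (tL.length : Int) ≤ (i₁ : Int) + (t₁.length : Int) := by
      obtain ⟨u, hu⟩ := pvHit_of_match s.toList iL tL ⟨memL, hpL⟩
      have := hmax iL hmL.1 u hu
      obtain rfl : u = tL := pvUniqAt s.toList iL u tL (pvHit_some s.toList iL u hu) ⟨memL, hpL⟩
      exact this
    -- (ii) i₁ + |t₁| ≤ iL + |tL| via A's minimality of the reversed find
    have h₁rev : t₁.reverse <+: s.toList.reverse.drop (s.toList.length - (i₁ + t₁.length)) := by
      refine (pvRevPrefix s.toList t₁ (s.toList.length - (i₁ + t₁.length)) (by omega)).mpr ?_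
      exact ⟨i₁, by omega, hm₁.2⟩
    have h₁le := pvFind_le s.toList.reverse t₁.reverse (s.toList.length - (i₁ + t₁.length)) h₁rev
    have hminL₁ := hminL t₁ hm₁.1 (by omega)
    omega
  have e₁ : t₁ = tL := pvUniqEnd s.toList i₁ iL t₁ tL hm₁ ⟨memL, hpL⟩ hend
  -- evaluate both ports
  unfold pvDecodeSingleA pvDecodeSingleB pvScanB
  rw [pvKeysValues, PySem.List.foldl_prod_mk, heqA, heqL, heqB, e₀, e₁]
  simp only [pvDigit_eq tA memA, pvDigit_eq tL memL]

lemma pvMemPairUp (l : List String) (p : String × String) (hp : p ∈ pvPairUp l) :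
    p.1 ∈ l ∧ p.2 ∈ l := by
  induction l using pvPairUp.induct with
  | case1 a b rest ih =>
    simp only [pvPairUp, List.mem_cons] at hp
    rcases hp with rfl | hp
    · simp
    · obtain ⟨h1, h2⟩ := ih hp
      exact ⟨List.mem_cons_of_mem _ (List.mem_cons_of_mem _ h1),
             List.mem_cons_of_mem _ (List.mem_cons_of_mem _ h2)⟩
  | case2 l h => simp [pvPairUp] at hp

-- A's pairing comprehension equals pvPairUp on even-length lists
lemma pvGetPair (l : List String) (n : Nat) :
    ((PySem.List.pyGet? l (0 + 2 * (n : Int))).getD "",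
     (PySem.List.pyGet? l (0 + 2 * (n : Int) + 1)).getD "")
    = ((l[2 * n]?).getD "", (l[2 * n + 1]?).getD "") := by
  have e5 : (0 + 2 * (n : Int) + 1) = ((2 * n + 1 : Nat) : Int) := by push_cast; ring
  have e4 : (0 + 2 * (n : Int)) = ((2 * n : Nat) : Int) := by push_cast; ring
  rw [e5, e4, PySem.List.pyGet?_natCast, PySem.List.pyGet?_natCast]

lemma pvPairAux : ∀ (m : Nat) (l : List String), l.length = 2 * m →
    (List.range m).map
      (fun (k : Nat) => ((PySem.List.pyGet? l (0 + 2 * (k : Int))).getD "",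
                 (PySem.List.pyGet? l (0 + 2 * (k : Int) + 1)).getD ""))
      = pvPairUp l := by
  intro m
  induction m with
  | zero =>
    intro l h
    obtain rfl : l = [] := List.length_eq_zero_iff.mp (by omega)
    simp [pvPairUp]
  | succ m ih =>
    intro l h
    rcases l with _ | ⟨a, _ | ⟨b, rest⟩⟩
    · simp at h
    · simp at h; omega
    · have hrest : rest.length = 2 * m := by simp at h; omega
      rw [List.range_succ_eq_map, List.map_cons, List.map_map]
      rw [pvGetPair (a :: b :: rest) 0]
      show _ = (a, b) :: pvPairUp rest
      congr 1
      rw [← ih rest hrest]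
      refine List.map_congr_left (fun k hk => ?_)
      rw [Function.comp_apply]
      rw [show Nat.succ k = k + 1 from rfl]
      rw [pvGetPair (a :: b :: rest) (k + 1), pvGetPair rest k]
      have g1 : (a :: b :: rest)[2 * (k + 1)]? = rest[2 * k]? := by
        rw [show 2 * (k + 1) = 2 * k + 1 + 1 by ring]
        rw [List.getElem?_cons_succ, List.getElem?_cons_succ]
      have g2 : (a :: b :: rest)[2 * (k + 1) + 1]? = rest[2 * k + 1]? := by
        rw [show 2 * (k + 1) + 1 = 2 * k + 2 + 1 by ring]
        rw [List.getElem?_cons_succ, List.getElem?_cons_succ]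
      rw [g1, g2]

lemma pvPairing (l : List String) (h : l.length % 2 = 0) :
    (PySem.List.pyRange 0 (l.length : Int) 2).map
      (fun i => ((PySem.List.pyGet? l i).getD "", (PySem.List.pyGet? l (i + 1)).getD ""))
      = pvPairUp l := by
  obtain ⟨m, hm⟩ : ∃ m, l.length = 2 * m := ⟨l.length / 2, by omega⟩
  rw [PySem.List.pyRange_of_pos 0 (l.length : Int) (by norm_num), List.map_map]
  have hcount : (if (0 : Int) < (l.length : Int)
      then (((l.length : Int) - 0 + 2 - 1) / 2).toNat else 0) = m := by
    rcases Nat.eq_zero_or_pos m with rfl | hpos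
    · rw [if_neg]; omega
    · rw [if_pos (by omega)]; omega
  rw [hcount]
  exact pvPairAux m l hm

-- ===== VERDICT (by name: the statement is the Claim_ definition above) =====
theorem decode_all_coords_spec : Claim_equal_decode_all_coords := by
  intro l _ hpre
  unfold Spec_decode_all_coords decode_all_coords decode_all_coords_alt
  rw [PySem.List.foldl_append_singleton_eq_map, List.nil_append, pvPairing l hpre.1]
  refine List.map_congr_left (fun p hp => ?_)
  obtain ⟨h1, h2⟩ := pvMemPairUp l p hp
  rw [pvSingleEq p.1 (hpre.2 p.1 h1), pvSingleEq p.2 (hpre.2 p.2 h2)]
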